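-- pv_equiv track=rewrite | github.com/manzt/deep_lincs | deep_lincs/models/auto_encoder.py | _get_hidden_size
-- ===== SOURCE A (Python) =====
-- def _get_hidden_size(hidden_layers):
--     min_size = min(hidden_layers)
--     num_min = len([size for size in hidden_layers if size == min_size])
--     if num_min is not 1:
--         raise ValueError(
--             f"Auto encoder does not contain bottleneck. "
--             f"Make sure there is a single minimum in hidden layers: {hidden_layers}."
--         )
--     return min_size
-- ===== SOURCE B (Python) =====
-- def _get_hidden_size(hidden_layers):
--     # Single pass keeping the two smallest values seen so far; the bottleneck
--     # exists iff the list is non-empty and the runner-up differs from the minimum.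
--     m1 = m2 = None
--     for x in hidden_layers:
--         if m1 is None:
--             m1 = x
--         elif x < m1:
--             m2 = m1
--             m1 = x
--         elif m2 is None or x < m2:
--             m2 = x
--     if m1 is None or m2 == m1:
--         raise ValueError(
--             f"Auto encoder does not contain bottleneck. "
--             f"Make sure there is a single minimum in hidden layers: {hidden_layers}."
--         )
--     return m1
-- ===== Notes on version B (the rewrite author's own statement) =====
-- stated objective: alternative
-- what changed: Replaced min() followed by a second filtering pass counting the minima with a single pass that maintains the smallest and second-smallest values; uniqueness of the minimum becomes 'runner-up differs from minimum'.
import Mathlib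
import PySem

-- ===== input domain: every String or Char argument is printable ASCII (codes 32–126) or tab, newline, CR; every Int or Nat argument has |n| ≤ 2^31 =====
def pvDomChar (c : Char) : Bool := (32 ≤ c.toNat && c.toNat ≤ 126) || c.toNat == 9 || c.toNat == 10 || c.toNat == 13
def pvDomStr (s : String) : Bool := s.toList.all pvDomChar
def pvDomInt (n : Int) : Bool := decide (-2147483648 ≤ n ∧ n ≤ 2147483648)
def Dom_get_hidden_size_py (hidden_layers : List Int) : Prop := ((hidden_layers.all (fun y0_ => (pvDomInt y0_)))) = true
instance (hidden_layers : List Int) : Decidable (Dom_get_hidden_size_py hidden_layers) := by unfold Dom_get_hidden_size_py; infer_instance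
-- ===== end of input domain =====

-- B replaces A's min()-then-count two-pass check with a single pass tracking the two
-- smallest values; same result wherever A returns (Pre_: non-empty list with a unique minimum).


-- ===== PORT A =====
-- min(hidden_layers); count the elements equal to it; raise unless exactly one (raise → 0, excluded by Pre_)
def get_hidden_size_py (hidden_layers : List Int) : Int :=
  match PySem.List.min? hidden_layers (fun x => x) with
  | none => 0  -- min() raises ValueError on an empty list; excluded by Pre_
  | some min_size =>
    let num_min : Int := (hidden_layers.filter (fun size => size == min_size)).length
    if num_min ≠ 1 then 0  -- raise ValueError; excluded by Pre_
    else min_size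

-- ===== PORT B =====
-- one loop step of Source B: state (m1, m2) = two smallest seen so far
def bStep (s : Option Int × Option Int) (x : Int) : Option Int × Option Int :=
  match s with
  | (none, m2) => (some x, m2)
  | (some a, m2) =>
    if x < a then (some x, some a)
    else match m2 with
      | none => (some a, some x)
      | some b => if x < b then (some a, some x) else (some a, some b)

def get_hidden_size_py_alt (hidden_layers : List Int) : Int :=
  match hidden_layers.foldl bStep (none, none) with
  | (none, _) => 0          -- raise ValueError (empty list); excluded by Pre_
  | (some a, m2) => if m2 = some a then 0 else a  -- tie raise → 0; excluded by Pre_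

-- ===== PRECONDITION & SPEC =====
-- Pre_ excludes exactly the inputs on which A raises ValueError: the empty list and
-- lists whose minimum occurs more than once.
def Pre_get_hidden_size_py (hidden_layers : List Int) : Prop :=
  ∃ m, m ∈ hidden_layers ∧ (∀ y ∈ hidden_layers, m ≤ y) ∧ hidden_layers.count m = 1
instance (hidden_layers : List Int) : Decidable (Pre_get_hidden_size_py hidden_layers) := by unfold Pre_get_hidden_size_py; infer_instance
def pvWitness_get_hidden_size_py : List Int := [3, 1, 2]
def Spec_get_hidden_size_py (hidden_layers : List Int) (out : Int) : Prop := out = get_hidden_size_py_alt hidden_layers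
instance (hidden_layers : List Int) (out : Int) : Decidable (Spec_get_hidden_size_py hidden_layers out) := by unfold Spec_get_hidden_size_py; infer_instance

-- ===== CLAIM (what is proved, stated in full; the proofs are below) =====
def Claim_equal_get_hidden_size_py : Prop := ∀ (hidden_layers : List Int), Dom_get_hidden_size_py hidden_layers → Pre_get_hidden_size_py hidden_layers → Spec_get_hidden_size_py hidden_layers (get_hidden_size_py hidden_layers)

-- ===== LEMMAS AND PROOFS =====

-- Invariant of B's fold on a non-empty list: first component is the minimum, and the
-- runner-up equals it exactly when the minimum occurs at least twice.
theorem bInv (xs : List Int) (hne : xs ≠ []) :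
    ∃ a m2, xs.foldl bStep (none, none) = (some a, m2) ∧ a ∈ xs ∧ (∀ y ∈ xs, a ≤ y) ∧
      ((m2 = some a) ↔ 2 ≤ xs.count a) ∧ (∀ b, m2 = some b → a ≤ b) := by
  induction xs using List.reverseRecOn with
  | nil => exact absurd rfl hne
  | append_singleton xs x ih =>
    rcases eq_or_ne xs [] with rfl | hxs
    · refine ⟨x, none, rfl, by simp, by simp, ?_, by simp⟩
      simp
    · obtain ⟨a, m2, hfold, hmem, hmin, hiff, hle⟩ := ih hxs
      rw [List.foldl_append, hfold]
      simp only [List.foldl_cons, List.foldl_nil]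
      have hcount : (xs ++ [x]).count a = xs.count a + (if x = a then 1 else 0) := by
        rcases eq_or_ne x a with rfl | h
        · simp [List.count_append]
        · simp [List.count_append, h]
      have hcount1 : 1 ≤ xs.count a := List.one_le_count_iff.mpr hmem
      by_cases hx : x < a
      · -- new minimum x; old a becomes runner-up
        refine ⟨x, some a, by simp [bStep, hx], by simp, ?_, ?_, ?_⟩
        · intro y hy
          rcases List.mem_append.mp hy with hy | hy
          · exact le_trans (le_of_lt hx) (hmin y hy)
          · simp at hy; omega
        · constructor
          · intro h; simp at h; omega
          · intro h
            have : (xs ++ [x]).count x = 1 := by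
              have hz : xs.count x = 0 := by
                rw [List.count_eq_zero]
                intro hmemx
                exact absurd (hmin x hmemx) (not_le.mpr hx)
              simp [List.count_append, hz]
            omega
        · intro b hb; simp at hb; omega
      · push_neg at hx
        by_cases hne2 : m2 = none
        · -- runner-up was empty: xs had exactly one element equal to a (its unique min so far)
          subst hne2
          have hc1 : xs.count a = 1 := by
            have := hiff.mpr
            by_contra h
            have h2 : 2 ≤ xs.count a := by omega
            exact absurd (this h2) (by simp)
          refine ⟨a, some x, by simp [bStep, not_lt.mpr hx], by simp [hmem], ?_, ?_, ?_⟩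
          · intro y hy
            rcases List.mem_append.mp hy with hy | hy
            · exact hmin y hy
            · simp at hy; omega
          · constructor
            · intro h; simp at h; rw [hcount, hc1]; simp [h]
            · intro h
              rw [hcount, hc1] at h
              rcases eq_or_ne x a with rfl | hxa
              · rfl
              · rw [if_neg hxa] at h; omega
          · intro b hb; simp at hb; omega
        · obtain ⟨b, rfl⟩ := Option.ne_none_iff_exists'.mp hne2
          have hab : a ≤ b := hle b rfl
          by_cases hxb : x < b
          · -- x replaces b as runner-up; b ≠ a here since a ≤ x < b would force a < b... handle both
            have hbne : b ≠ a := by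
              intro h; subst h; exact absurd hxb (not_lt.mpr hx)
            have hc1 : xs.count a = 1 := by
              by_contra h
              have := hiff.mpr (by omega)
              simp at this; exact hbne this
            refine ⟨a, some x, by simp [bStep, not_lt.mpr hx, hxb], by simp [hmem], ?_, ?_, ?_⟩
            · intro y hy
              rcases List.mem_append.mp hy with hy | hy
              · exact hmin y hy
              · simp at hy; omega
            · constructor
              · intro h; simp at h; rw [hcount, hc1]; simp [h]
              · intro h
                rw [hcount, hc1] at h
                rcases eq_or_ne x a with rfl | hxa
                · rfl
                · rw [if_neg hxa] at h; omega
            · intro c hc; simp at hc; omega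
          · -- b stays as runner-up
            refine ⟨a, some b, by simp [bStep, not_lt.mpr hx, not_lt.mpr (not_lt.mp hxb)], by simp [hmem], ?_, ?_, ?_⟩
            · intro y hy
              rcases List.mem_append.mp hy with hy | hy
              · exact hmin y hy
              · simp at hy; omega
            · rcases eq_or_ne b a with rfl | hba
              · have h2 := hiff.mp rfl
                rw [hcount]
                exact ⟨fun _ => by omega, fun _ => rfl⟩
              · have hc1 : xs.count a = 1 := by
                  by_contra h
                  have := hiff.mpr (by omega)
                  simp at this; exact hba this
                have hxa : x ≠ a := fun h => hba (le_antisymm (h ▸ not_lt.mp hxb) hab)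
                constructor
                · intro h; simp at h; exact absurd h hba
                · intro h
                  rw [hcount, hc1, if_neg hxa] at h
                  omega
            · intro c hc; simp at hc; omega

-- A's min? equals the fold min, characterised via PySem lemmas
theorem a_returns_min (l : List Int) (m : Int) (hmem : m ∈ l) (hmin : ∀ y ∈ l, m ≤ y)
    (hc : l.count m = 1) : get_hidden_size_py l = m := by
  obtain ⟨x, t, rfl⟩ : ∃ x t, l = x :: t := by
    cases l with
    | nil => simp at hmem
    | cons x t => exact ⟨x, t, rfl⟩
  unfold get_hidden_size_py
  rw [PySem.List.min?_id_cons]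
  simp only
  have hf := PySem.List.foldl_min_le t x
  have hfm := PySem.List.foldl_min_mem t x
  have heq : t.foldl min x = m := by
    have h1 : t.foldl min x ≤ m := by
      rcases List.mem_cons.mp hmem with rfl | hm
      · exact hf.1
      · exact hf.2 m hm
    have h2 : m ≤ t.foldl min x := by
      rcases hfm with h | h
      · rw [h]; exact hmin x (by simp)
      · exact hmin _ (by simp [h])
    omega
  rw [heq]
  have hlen : ((x :: t).filter (fun size => size == m)).length = (x :: t).count m := by
    simp [List.count_eq_length_filter]
  rw [hlen, hc]
  simp

theorem b_returns_min (l : List Int) (m : Int) (hmem : m ∈ l) (hmin : ∀ y ∈ l, m ≤ y)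
    (hc : l.count m = 1) : get_hidden_size_py_alt l = m := by
  have hne : l ≠ [] := by rintro rfl; simp at hmem
  obtain ⟨a, m2, hfold, hamem, hamin, hiff, _⟩ := bInv l hne
  have ham : a = m := le_antisymm (hamin m hmem) (hmin a hamem)
  subst ham
  unfold get_hidden_size_py_alt
  rw [hfold]
  have : m2 ≠ some a := by
    intro h
    have := hiff.mp h
    omega
  simp [this]

-- ===== VERDICT (by name: the statement is the Claim_ definition above) =====
theorem get_hidden_size_py_spec : Claim_equal_get_hidden_size_py := by
  intro l _ hpre
  obtain ⟨m, hmem, hmin, hc⟩ := hpre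
  unfold Spec_get_hidden_size_py
  rw [a_returns_min l m hmem hmin hc, b_returns_min l m hmem hmin hc]
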